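-- pv_equiv track=rewrite | github.com/microsoft/ML-For-Beginners | .venv/Lib/site-packages/fontTools/cffLib/specializer.py | vlineto
-- ===== SOURCE A (Python) =====
-- def vlineto(args):
--     if not args:
--         raise ValueError(args)
--     it = iter(args)
--     try:
--         while True:
--             yield ("rlineto", [0, next(it)])
--             yield ("rlineto", [next(it), 0])
--     except StopIteration:
--         pass
-- ===== SOURCE B (Python) =====
-- def vlineto(args):
--     if not args:
--         raise ValueError(args)
--     evens = args[0::2]
--     odds = args[1::2]
--     out = []
--     for a, b in zip(evens, odds):
--         out.append(("rlineto", [0, a]))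
--         out.append(("rlineto", [b, 0]))
--     if len(evens) > len(odds):
--         out.append(("rlineto", [0, evens[-1]]))
--     return out
-- ===== Notes on version B (the rewrite author's own statement) =====
-- stated objective: alternative
-- what changed: Replaces A's one-pass generator that pulls two elements per iteration via next()/StopIteration with staged passes: two strided slices (even/odd positions), a zip interleave building pairs of commands, and a final odd-tail fix-up.
import Mathlib
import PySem

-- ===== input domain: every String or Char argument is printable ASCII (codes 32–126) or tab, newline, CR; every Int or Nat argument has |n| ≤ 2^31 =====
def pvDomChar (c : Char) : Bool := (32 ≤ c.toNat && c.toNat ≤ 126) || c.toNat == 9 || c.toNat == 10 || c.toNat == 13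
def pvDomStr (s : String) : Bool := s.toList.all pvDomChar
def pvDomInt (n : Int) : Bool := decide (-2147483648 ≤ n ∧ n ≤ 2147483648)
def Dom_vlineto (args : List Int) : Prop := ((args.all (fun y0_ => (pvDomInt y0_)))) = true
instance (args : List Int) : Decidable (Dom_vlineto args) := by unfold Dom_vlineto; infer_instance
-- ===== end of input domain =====

-- B replaces A's paired manual next()/StopIteration generator loop with staged passes: two strided slices (even/odd positions), a zip interleave, and an odd-tail fix-up (objective: alternative).


-- ===== PORT A =====
-- the while/next-next loop: pulls two elements per iteration, stops at StopIteration
def vlinetoLoopA : List Int → List (String × List Int)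
  | [] => []
  | [x] => [("rlineto", [0, x])]
  | x :: y :: rest => ("rlineto", [0, x]) :: ("rlineto", [y, 0]) :: vlinetoLoopA rest

def vlineto (args : List Int) : List (String × List Int) :=
  vlinetoLoopA args   -- 'if not args: raise ValueError(args)' is excluded by Pre_vlineto

-- ===== PORT B =====
def vlineto_alt (args : List Int) : List (String × List Int) :=
  -- evens = args[0::2], odds = args[1::2]  (step-2 slices never raise: step ≠ 0, so .getD [] is exact)
  let evens := (PySem.List.slice? args (some 0) none 2).getD []
  let odds := (PySem.List.slice? args (some 1) none 2).getD []
  let out := (evens.zip odds).foldl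
    (fun out p => out ++ [("rlineto", [0, p.1]), ("rlineto", [p.2, 0])]) []
  if odds.length < evens.length then
    -- evens[-1]; in this branch evens ≠ [], so pyGet? is some and .getD 0 is exact
    out ++ [("rlineto", [0, (PySem.List.pyGet? evens (-1)).getD 0])]
  else out

-- ===== PRECONDITION & SPEC =====
-- Pre_ excludes only the empty list, on which the Python A raises ValueError (B too).
def Pre_vlineto (args : List Int) : Prop := args ≠ []
instance (args : List Int) : Decidable (Pre_vlineto args) := by unfold Pre_vlineto; infer_instance
def pvWitness_vlineto : List Int := [3, -1, 7]
def Spec_vlineto (args : List Int) (out : List (String × List Int)) : Prop := out = vlineto_alt args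
instance (args : List Int) (out : List (String × List Int)) : Decidable (Spec_vlineto args out) := by unfold Spec_vlineto; infer_instance

-- ===== CLAIM =====
def Claim_equal_vlineto : Prop := ∀ (args : List Int), Dom_vlineto args → Pre_vlineto args → Spec_vlineto args (vlineto args)

-- ===== LEMMAS AND PROOFS =====

-- elements at even positions of a list (what args[0::2] selects)
def evensF : List Int → List Int
  | [] => []
  | [x] => [x]
  | x :: _ :: rest => x :: evensF rest

theorem evensF_cons (a : Int) (l : List Int) : evensF (a :: l) = a :: evensF l.tail := by
  cases l <;> simp [evensF]

theorem filterMap_range_evensF (xs : List Int) :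
    (List.range ((xs.length + 1) / 2)).filterMap (fun k => xs[2 * k]?) = evensF xs := by
  induction xs using evensF.induct with
  | case1 => simp [evensF]
  | case2 x => simp [evensF]
  | case3 x y r ih =>
    have hc : (((x :: y :: r).length + 1) / 2) = (r.length + 1) / 2 + 1 := by simp; omega
    rw [hc, List.range_succ_eq_map, List.filterMap_cons, List.filterMap_map]
    simp only [Nat.mul_zero, List.getElem?_cons_zero]
    have : (fun k => (x :: y :: r)[2 * (k + 1)]?) = fun k => r[2 * k]? := by
      funext k
      have h2 : 2 * (k + 1) = 2 * k + 1 + 1 := by omega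
      rw [h2, List.getElem?_cons_succ, List.getElem?_cons_succ]
    simp only [Function.comp_def, this, ih, evensF]

theorem slice?_even (xs : List Int) :
    PySem.List.slice? xs (some 0) none 2 = some (evensF xs) := by
  simp only [PySem.List.slice?, PySem.List.sliceIndices]
  norm_num
  rw [show (if 0 < xs.length then (((xs.length : Int) + 2 - 1) / 2).toNat else 0)
        = (xs.length + 1) / 2 by
      split <;> omega]
  rw [← filterMap_range_evensF]
  simp only [show ∀ k : Nat, ((2 * (k:Int)).toNat) = 2 * k from fun k => by omega]

theorem slice?_odd (xs : List Int) :
    PySem.List.slice? xs (some 1) none 2 = some (evensF xs.tail) := by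
  cases xs with
  | nil => simp [PySem.List.slice?, PySem.List.sliceIndices, evensF]
  | cons x t =>
    simp only [PySem.List.slice?, PySem.List.sliceIndices]
    norm_num
    rw [show (if 0 < t.length then (((t.length : Int) + 2 - 1) / 2).toNat else 0)
          = (t.length + 1) / 2 by
        split <;> omega]
    rw [← filterMap_range_evensF t]
    congr 1
    funext k
    rw [show ((1:Int) + 2 * (k:Int)).toNat = 2 * k + 1 by omega]
    exact List.getElem?_cons_succ

theorem pyGet?_neg_one_cons (x : Int) (l : List Int) (h : l ≠ []) :
    PySem.List.pyGet? (x :: l) (-1) = PySem.List.pyGet? l (-1) := by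
  have hl : 0 < l.length := List.length_pos_iff.mpr h
  simp only [PySem.List.pyGet?, PySem.List.pyIdx?, List.length_cons]
  rw [if_neg (show ¬ (0:Int) ≤ -1 by norm_num), if_neg (show ¬ (0:Int) ≤ -1 by norm_num)]
  rw [if_pos (show -(((l.length + 1 : Nat)) : Int) ≤ -1 by push_cast; omega),
      if_pos (show -((l.length : Nat) : Int) ≤ -1 by omega)]
  norm_num
  rw [List.getElem?_eq_getElem (by omega), List.getElem_cons]
  simp [Nat.pos_iff_ne_zero.mp hl]

-- B's body after the two slices have been resolved to evensF
def altCore (E O : List Int) : List (String × List Int) :=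
  ((E.zip O).flatMap fun p => [("rlineto", [0, p.1]), ("rlineto", [p.2, 0])]) ++
    (if O.length < E.length then
      [("rlineto", [0, (PySem.List.pyGet? E (-1)).getD 0])] else [])

theorem foldl_zip_flatMap (l : List (Int × Int)) (acc : List (String × List Int)) :
    l.foldl (fun out p => out ++ [("rlineto", [0, p.1]), ("rlineto", [p.2, 0])]) acc =
      acc ++ l.flatMap fun p => [("rlineto", [0, p.1]), ("rlineto", [p.2, 0])] := by
  induction l generalizing acc with
  | nil => simp
  | cons p t ih => simp [ih]

theorem vlineto_alt_eq_altCore (args : List Int) :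
    vlineto_alt args = altCore (evensF args) (evensF args.tail) := by
  simp only [vlineto_alt, slice?_even, slice?_odd, Option.getD_some, foldl_zip_flatMap,
    List.nil_append, altCore]
  split <;> simp

theorem loopA_eq_altCore (args : List Int) :
    vlinetoLoopA args = altCore (evensF args) (evensF args.tail) := by
  induction args using vlinetoLoopA.induct with
  | case1 => simp [vlinetoLoopA, evensF, altCore]
  | case2 x =>
    simp [vlinetoLoopA, evensF, altCore, PySem.List.pyGet?, PySem.List.pyIdx?]
  | case3 x y r ih =>
    simp only [vlinetoLoopA, ih, evensF_cons, List.tail_cons, altCore, List.zip_cons_cons,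
      List.flatMap_cons, List.length_cons]
    have hiff : (evensF r.tail).length + 1 < (evensF r).length + 1 ↔
        (evensF r.tail).length < (evensF r).length := by omega
    by_cases h : (evensF r.tail).length < (evensF r).length
    · have hne : evensF r ≠ [] := by
        intro he; rw [he] at h; simp at h
      rw [if_pos (hiff.mpr h), if_pos h, pyGet?_neg_one_cons x _ hne]
      simp
    · rw [if_neg (fun hc => h (hiff.mp hc)), if_neg h]
      simp

-- ===== VERDICT =====
theorem vlineto_spec : Claim_equal_vlineto := by
  intro args _ _
  show vlineto args = vlineto_alt args
  rw [vlineto, loopA_eq_altCore, vlineto_alt_eq_altCore]
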